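-- pv_equiv track=rewrite | github.com/LauraDiosan-CS/lab04-gatsp-SilviuCAnton | domain/TSPChromosome.py | renumbering
-- ===== SOURCE A (Python) =====
-- def renumbering(repr):
--     reprdict = {}
--     number = 1
--     for label in sorted(repr):
--         if label not in reprdict:
--             reprdict[label] = number
--             number += 1
--     for i in range(len(repr)):
--         repr[i] = reprdict[repr[i]]
--     return repr
-- ===== SOURCE B (Python) =====
-- def _bisect_left(a, x):
--     lo, hi = 0, len(a)
--     while lo < hi:
--         mid = (lo + hi) // 2
--         if a[mid] < x:
--             lo = mid + 1
--         else:
--             hi = mid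
--     return lo
--
--
-- def renumbering(repr):
--     unique = sorted(set(repr))
--     for i in range(len(repr)):
--         repr[i] = _bisect_left(unique, repr[i]) + 1
--     return repr
-- ===== Notes on version B (the rewrite author's own statement) =====
-- stated objective: alternative
-- what changed: Replaces the dict-building pass over the whole sorted list (membership test per element) with a sorted distinct-value array built once from set(repr), each element then ranked by binary search instead of a dict lookup.
import Mathlib
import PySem

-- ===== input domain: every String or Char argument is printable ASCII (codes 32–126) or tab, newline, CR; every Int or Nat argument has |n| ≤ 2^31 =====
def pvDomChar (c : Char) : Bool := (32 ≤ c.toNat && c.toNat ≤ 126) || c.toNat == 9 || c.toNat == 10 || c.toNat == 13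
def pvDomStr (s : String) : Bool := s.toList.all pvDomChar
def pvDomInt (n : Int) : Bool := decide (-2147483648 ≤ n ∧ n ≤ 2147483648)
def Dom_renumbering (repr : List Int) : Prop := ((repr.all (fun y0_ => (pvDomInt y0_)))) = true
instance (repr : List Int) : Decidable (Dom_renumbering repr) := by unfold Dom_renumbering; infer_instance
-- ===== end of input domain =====

-- B replaces A's dict built by scanning the whole sorted list with a sorted distinct-value
-- array ranked by binary search (alternative, not claimed faster). A mutates its argument in
-- place; the equivalence proved here is about the RETURN value only.

-- ===== PORT A =====
-- first loop: build reprdict / number over sorted(repr)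
def renumberingStep (p : PySem.Dict Int Int × Int) (label : Int) : PySem.Dict Int Int × Int :=
  if p.1.contains label then p else (p.1.insert label p.2, p.2 + 1)

def renumbering (repr : List Int) : List Int :=
  let st := (PySem.List.sorted repr (fun x => x) false).foldl renumberingStep (PySem.Dict.empty, 1)
  -- second loop: for i in range(len(repr)): repr[i] = reprdict[repr[i]]
  -- the key repr[i] is always a key of reprdict, so the KeyError case (get? = none) is unreachable
  (PySem.List.pyRange 0 (PySem.List.len repr) 1).foldl
    (fun acc i => PySem.List.pySetD acc i ((st.1.get? (PySem.List.pyGetD acc i 0)).getD 0)) repr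

-- ===== PORT B =====
-- hand-written binary search of Source B, step for step; lo/hi/mid are nonnegative Python ints,
-- so Nat arithmetic ((lo+hi)/2 = Python's //) is exact; a[mid] is read only with mid < len(a)
def bisectLeftLoop (a : List Int) (x : Int) (lo hi : Nat) : Nat :=
  if lo < hi then
    let mid := (lo + hi) / 2
    if a.getD mid 0 < x then bisectLeftLoop a x (mid + 1) hi
    else bisectLeftLoop a x lo mid
  else lo
termination_by hi - lo
decreasing_by all_goals omega

def renumbering_alt (repr : List Int) : List Int :=
  let unique := PySem.List.sorted (PySem.Set.ofList repr) (fun x => x) false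
  repr.map (fun x => ((bisectLeftLoop unique x 0 unique.length : Nat) : Int) + 1)

-- ===== PRECONDITION & SPEC =====
def Spec_renumbering (repr : List Int) (out : List Int) : Prop := out = renumbering_alt repr
instance (repr : List Int) (out : List Int) : Decidable (Spec_renumbering repr out) := by unfold Spec_renumbering; infer_instance

-- ===== CLAIM (what is proved, stated in full; the proofs are below) =====
def Claim_equal_renumbering : Prop := ∀ (repr : List Int), Dom_renumbering repr → Spec_renumbering repr (renumbering repr)

-- ===== LEMMAS AND PROOFS =====

-- a list whose first r positions satisfy q and whose later positions do not has countP q = r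
theorem countP_eq_of_cut (a : List Int) (q : Int → Bool) (r : Nat) (hr : r ≤ a.length)
    (h : ∀ j (hj : j < a.length), (j < r ↔ q a[j] = true)) :
    a.countP q = r := by
  have hsplit : a = a.take r ++ a.drop r := (List.take_append_drop r a).symm
  rw [hsplit, List.countP_append]
  have h1 : (a.take r).countP q = (a.take r).length := by
    rw [List.countP_eq_length]
    intro y hy
    obtain ⟨j, hj, rfl⟩ := List.getElem_of_mem hy
    rw [List.getElem_take]
    have hj' : j < r := by simp at hj; omega
    exact (h j (by simp at hj; omega)).mp hj'
  have h2 : (a.drop r).countP q = 0 := by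
    rw [List.countP_eq_zero]
    intro y hy
    obtain ⟨j, hj, rfl⟩ := List.getElem_of_mem hy
    rw [List.getElem_drop]
    intro hq
    have := (h (r + j) (by simp at hj; omega)).mpr hq
    omega
  rw [h1, h2, List.length_take]
  omega

-- the binary search returns the number of elements < x of a nondecreasing list
theorem bisectLeftLoop_go (a : List Int) (x : Int) (hs : a.Pairwise (· ≤ ·)) :
    ∀ (n lo hi : Nat), hi - lo ≤ n → lo ≤ hi → hi ≤ a.length →
    (∀ j (hj : j < a.length), j < lo → a[j] < x) →
    (∀ j (hj : j < a.length), hi ≤ j → ¬ a[j] < x) →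
    bisectLeftLoop a x lo hi = a.countP (fun y => decide (y < x)) := by
  have hmono : ∀ i j (hi : i < a.length) (hj : j < a.length), i ≤ j → a[i] ≤ a[j] := by
    intro i j hi hj hij
    rcases Nat.lt_or_ge i j with h | h
    · exact List.pairwise_iff_getElem.mp hs i j hi hj h
    · have : i = j := by omega
      subst this; exact le_refl _
  intro n
  induction n with
  | zero =>
    intro lo hi hn hlh hhi hL hR
    have : lo = hi := by omega
    subst this
    rw [bisectLeftLoop]
    simp only [lt_irrefl, if_false]
    refine (countP_eq_of_cut a _ lo (by omega) ?_).symm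
    intro j hj
    constructor
    · intro h; simpa using hL j hj h
    · intro h
      by_contra hge
      exact (hR j hj (by omega)) (by simpa using h)
  | succ n ih =>
    intro lo hi hn hlh hhi hL hR
    by_cases hlt : lo < hi
    · rw [bisectLeftLoop]
      simp only [hlt, if_true]
      have hmid : (lo + hi) / 2 < a.length := by omega
      have hgd : a.getD ((lo + hi) / 2) 0 = a[(lo + hi) / 2] := List.getD_eq_getElem a 0 hmid
      by_cases hb : a.getD ((lo + hi) / 2) 0 < x
      · simp only [hb, if_true]
        apply ih ((lo + hi) / 2 + 1) hi (by omega) (by omega) hhi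
        · intro j hj hjlt
          calc a[j] ≤ a[(lo + hi) / 2] := hmono j _ hj hmid (by omega)
            _ < x := by rw [← hgd]; exact hb
        · exact hR
      · simp only [hb, if_false]
        apply ih lo ((lo + hi) / 2) (by omega) (by omega) (by omega) hL
        intro j hj hmj hcon
        have : a[(lo + hi) / 2] ≤ a[j] := hmono _ j hmid hj hmj
        rw [hgd] at hb
        exact hb (lt_of_le_of_lt this hcon)
    · exact ih lo hi (by omega) hlh hhi hL hR

-- A's dict-building fold, characterised by induction on the sorted list from the right
theorem renumbering_fold_spec (s : List Int) (hs : s.Pairwise (· ≤ ·)) :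
    (∀ y, ((s.foldl renumberingStep (PySem.Dict.empty, 1)).1.contains y = true) ↔ y ∈ s) ∧
    ((s.foldl renumberingStep (PySem.Dict.empty, 1)).2 = ((PySem.Set.ofList s).length : Int) + 1) ∧
    (∀ x ∈ s, (s.foldl renumberingStep (PySem.Dict.empty, 1)).1.get? x
        = some ((((PySem.Set.ofList s).countP (fun y => decide (y < x)) : Nat) : Int) + 1)) := by
  induction s using List.reverseRecOn with
  | nil =>
    refine ⟨?_, ?_, ?_⟩
    · intro y; simp [PySem.Dict.contains, PySem.Dict.empty]
    · simp [PySem.Set.ofList]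
    · intro x hx; simp at hx
  | append_singleton s l ih =>
    obtain ⟨hps, -, hrel⟩ := List.pairwise_append.mp hs
    have hle : ∀ a ∈ s, a ≤ l := fun a ha => hrel a ha l (List.mem_singleton_self l)
    obtain ⟨ihc, ihn, ihg⟩ := ih hps
    rw [List.foldl_append]
    simp only [List.foldl_cons, List.foldl_nil]
    by_cases hmem : l ∈ s
    · have hc : (s.foldl renumberingStep (PySem.Dict.empty, 1)).1.contains l = true := (ihc l).mpr hmem
      simp only [renumberingStep, hc, if_true]
      have hof : PySem.Set.ofList (s ++ [l]) = PySem.Set.ofList s := by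
        rw [PySem.Set.ofList_append_singleton,
            PySem.Set.add_of_mem (by rw [PySem.Set.mem_ofList]; exact hmem)]
      refine ⟨?_, ?_, ?_⟩
      · intro y; rw [ihc]
        constructor
        · intro h; exact List.mem_append_left _ h
        · intro h
          rcases List.mem_append.mp h with h | h
          · exact h
          · simp at h; subst h; exact hmem
      · rw [hof]; exact ihn
      · intro x hx
        have hxs : x ∈ s := by
          rcases List.mem_append.mp hx with h | h
          · exact h
          · simp at h; subst h; exact hmem
        rw [hof]; exact ihg x hxs
    · have hc : (s.foldl renumberingStep (PySem.Dict.empty, 1)).1.contains l = false := by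
        rw [Bool.eq_false_iff]; intro h; exact hmem ((ihc l).mp h)
      simp only [renumberingStep, hc, Bool.false_eq_true, if_false]
      have hof : PySem.Set.ofList (s ++ [l]) = PySem.Set.ofList s ++ [l] := by
        rw [PySem.Set.ofList_append_singleton,
            PySem.Set.add_of_not_mem (by rw [PySem.Set.mem_ofList]; exact hmem)]
      have hlt : ∀ y ∈ PySem.Set.ofList s, y < l := by
        intro y hy
        have hys : y ∈ s := by rw [← PySem.Set.mem_ofList]; exact hy
        exact lt_of_le_of_ne (hle y hys) (fun h => hmem (h ▸ hys))
      refine ⟨?_, ?_, ?_⟩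
      · intro y
        rw [PySem.Dict.contains_insert, Bool.or_eq_true, beq_iff_eq, ihc, List.mem_append]
        simp [or_comm]
      · rw [ihn, hof]
        simp only [List.length_append, List.length_singleton, Nat.cast_add, Nat.cast_one]
      · intro x hx
        rcases List.mem_append.mp hx with hxs | hxl
        · have hxne : x ≠ l := fun h => hmem (h ▸ hxs)
          have h0 : List.countP (fun y => decide (y < x)) [l] = 0 := by
            have hnl : ¬ (l < x) := not_lt.mpr (hle x hxs)
            simp [hnl]
          rw [PySem.Dict.get?_insert_of_ne _ _ hxne, ihg x hxs, hof, List.countP_append, h0]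
          simp
        · simp only [List.mem_singleton] at hxl; subst hxl
          have h1 : List.countP (fun y => decide (y < x)) (PySem.Set.ofList s)
              = (PySem.Set.ofList s).length := List.countP_eq_length.mpr
            (fun y hy => by simpa using hlt y hy)
          have h2 : List.countP (fun y => decide (y < x)) [x] = 0 := by
            simp
          rw [PySem.Dict.get?_insert_self, ihn, hof, List.countP_append, h1, h2]
          simp

-- A's index-rewrite loop is a map over the original list (each position is read once,
-- before it is overwritten)
theorem setLoop_gen (g : Int → Int) (zs : List Int) : ∀ ys : List Int,
    (PySem.List.pyRange (ys.length : Int) ((ys.length : Int) + (zs.length : Int)) 1).foldl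
      (fun acc i => PySem.List.pySetD acc i (g (PySem.List.pyGetD acc i 0))) (ys ++ zs)
      = ys ++ zs.map g := by
  induction zs with
  | nil => intro ys; simp [PySem.List.pyRange_one_eq_nil]
  | cons z zs ih =>
    intro ys
    rw [PySem.List.pyRange_one_cons (by push_cast [List.length_cons]; omega)]
    simp only [List.foldl_cons]
    have h1 : PySem.List.pyGetD (ys ++ z :: zs) (ys.length : Int) 0 = z := by
      simp [PySem.List.pyGetD_natCast, List.getD]
    have h2 : PySem.List.pySetD (ys ++ z :: zs) (ys.length : Int) (g z) = (ys ++ [g z]) ++ zs := by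
      simp [PySem.List.pySetD_natCast, List.set_append_right _ _ (le_refl ys.length)]
    rw [h1, h2]
    have h3 : ((ys.length : Int) + 1) = (((ys ++ [g z]).length : Nat) : Int) := by
      simp
    have h4 : ((ys.length : Int) + ((z :: zs).length : Int))
        = (((ys ++ [g z]).length : Nat) : Int) + (zs.length : Int) := by
      simp; ring
    rw [h3, h4, ih (ys ++ [g z])]
    simp

theorem setLoop_eq_map (g : Int → Int) (xs : List Int) :
    (PySem.List.pyRange 0 (PySem.List.len xs) 1).foldl
      (fun acc i => PySem.List.pySetD acc i (g (PySem.List.pyGetD acc i 0))) xs = xs.map g := by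
  simpa using setLoop_gen g xs []

-- ===== VERDICT (by name: the statement is the Claim_ definition above) =====
theorem renumbering_spec : Claim_equal_renumbering := by
  intro repr _
  unfold Spec_renumbering
  simp only [renumbering, renumbering_alt]
  rw [setLoop_eq_map (fun v =>
    ((List.foldl renumberingStep (PySem.Dict.empty, 1)
        (PySem.List.sorted repr (fun x => x) false)).1.get? v).getD 0) repr]
  apply List.map_congr_left
  intro x hx
  -- A's side: the dict lookup
  have hsA : (PySem.List.sorted repr (fun x => x) false).Pairwise (· ≤ ·) :=
    PySem.List.sorted_pairwise repr (fun x => x)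
  have hmemA : x ∈ PySem.List.sorted repr (fun x => x) false := by
    rw [PySem.List.mem_sorted]; exact hx
  obtain ⟨-, -, ihg⟩ := renumbering_fold_spec _ hsA
  rw [ihg x hmemA]
  -- B's side: the binary search
  have hsU : (PySem.List.sorted (PySem.Set.ofList repr) (fun x => x) false).Pairwise (· ≤ ·) :=
    PySem.List.sorted_pairwise (PySem.Set.ofList repr) (fun x => x)
  have hb := bisectLeftLoop_go (PySem.List.sorted (PySem.Set.ofList repr) (fun x => x) false) x hsU
    (PySem.List.sorted (PySem.Set.ofList repr) (fun x => x) false).length 0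
    (PySem.List.sorted (PySem.Set.ofList repr) (fun x => x) false).length
    (by omega) (by omega) (le_refl _)
    (by intro j hj h; omega)
    (by intro j hj h hcon; omega)
  rw [hb]
  -- the two distinct-value lists are permutations of each other
  have hnd1 : (PySem.Set.ofList (PySem.List.sorted repr (fun x => x) false)).Nodup :=
    PySem.Set.nodup_ofList _
  have hnd2 : (PySem.List.sorted (PySem.Set.ofList repr) (fun x => x) false).Nodup := by
    rw [List.Perm.nodup_iff (PySem.List.sorted_perm _ _ _)]
    exact PySem.Set.nodup_ofList _
  have hperm : (PySem.List.sorted (PySem.Set.ofList repr) (fun x => x) false).Perm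
      (PySem.Set.ofList (PySem.List.sorted repr (fun x => x) false)) := by
    rw [List.perm_ext_iff_of_nodup hnd2 hnd1]
    intro a
    rw [PySem.List.mem_sorted, PySem.Set.mem_ofList, PySem.Set.mem_ofList,
        PySem.List.mem_sorted]
  rw [hperm.countP_eq]
  simp
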